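-- pv_equiv track=rewrite | github.com/firezdog/algorithms | contiguous_subarrays/contiguous_subarrays.py | count_left
-- ===== SOURCE A (Python) =====
-- def count_left(pointer, element, array, left_result):
--     curr = pointer - 1
--     count = 0
--
--     # use pre-computed values if the current element is greater than the last element
--     # this doesn't seem to be working yet
--     # previous = pointer - 1
--     # next_result = 0
--     # while previous >= 0 and element > array[previous]:
--     #     next_result += left_result[previous]
--     #     previous -= 1
--
--     while curr >= 0:
--         if element > array[curr]:
--             count += 1
--             curr -= 1
--         else:
--             break
--     # left_result.append(next_result)
--
--     return count
-- ===== SOURCE B (Python) =====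
-- def count_left(pointer, element, array, left_result):
--     # Forward pass: find the position of the LAST element >= element in the
--     # prefix array[:pointer]; the run of smaller elements left of `pointer`
--     # is everything after that blocker, so its length is n - 1 - last
--     # (last = -1 when no blocker exists, giving the whole prefix).
--     n = max(pointer, 0)
--     last = -1
--     for i, x in enumerate(array[:n]):
--         if x >= element:
--             last = i
--     return n - 1 - last
-- ===== Notes on version B (the rewrite author's own statement) =====
-- stated objective: alternative
-- what changed: Instead of A's backward scan with an early break counting the run of smaller elements, B makes one forward pass over the prefix recording the position of the last blocking element (>= element) and returns the run length by the closed form n - 1 - last; correctness: the run of elements < element ending at pointer-1 is exactly the part of the prefix after its last blocker.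
import Mathlib
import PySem

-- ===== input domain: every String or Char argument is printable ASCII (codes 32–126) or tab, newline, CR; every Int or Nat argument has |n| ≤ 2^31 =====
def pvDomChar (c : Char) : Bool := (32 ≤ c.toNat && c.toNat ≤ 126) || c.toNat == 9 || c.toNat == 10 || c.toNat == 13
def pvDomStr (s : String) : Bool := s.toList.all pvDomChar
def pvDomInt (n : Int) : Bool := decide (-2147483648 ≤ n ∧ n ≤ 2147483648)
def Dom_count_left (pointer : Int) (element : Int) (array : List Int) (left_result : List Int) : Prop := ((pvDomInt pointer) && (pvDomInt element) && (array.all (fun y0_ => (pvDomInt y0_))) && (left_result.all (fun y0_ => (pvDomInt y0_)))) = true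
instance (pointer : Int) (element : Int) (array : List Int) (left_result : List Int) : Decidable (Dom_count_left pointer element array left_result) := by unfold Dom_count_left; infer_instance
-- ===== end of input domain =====

-- B replaces A's backward break-on-first-blocker scan by a forward pass recording the last blocking position plus a closed-form subtraction (alternative, same cost); equal on Pre_ (pointer within bounds).


-- ===== PORT A =====
-- A's while loop; fuel = curr + 1 (curr = fuel - 1), so fuel 0 means curr < 0.
-- On an out-of-range index (A raises IndexError; outside Pre_) we return the accumulator.
def count_left_while (element : Int) (array : List Int) : Nat → Int → Int
  | 0, count => count
  | Nat.succ n, count =>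
      match PySem.List.pyGet? array (Int.ofNat n) with
      | none => count
      | some a => if element > a then count_left_while element array n (count + 1) else count

def count_left (pointer : Int) (element : Int) (array : List Int) (left_result : List Int) : Int :=
  count_left_while element array ((pointer - 1) + 1).toNat 0

-- ===== PORT B =====
-- B: forward pass over enumerate(array[:n]) keeping the index of the last x ≥ element
-- (last, initially -1), then the closed form n - 1 - last.
def count_left_alt (pointer : Int) (element : Int) (array : List Int) (left_result : List Int) : Int :=
  let n := max pointer 0
  let pref := PySem.List.slice array none (some n)
  let last := (PySem.List.enumerate pref).foldl
    (fun last ix => if ix.2 ≥ element then ix.1 else last) (-1)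
  n - 1 - last

-- ===== PRECONDITION & SPEC =====
-- A raises IndexError exactly when pointer - 1 ≥ len(array) (the first access is out of range).
def Pre_count_left (pointer : Int) (element : Int) (array : List Int) (left_result : List Int) : Prop :=
  pointer ≤ (array.length : Int)
instance (pointer : Int) (element : Int) (array : List Int) (left_result : List Int) : Decidable (Pre_count_left pointer element array left_result) := by unfold Pre_count_left; infer_instance
def pvWitness_count_left : Int × Int × List Int × List Int := (3, 2, [5, 1, 0], [0, 0, 1])

def Spec_count_left (pointer : Int) (element : Int) (array : List Int) (left_result : List Int) (out : Int) : Prop := out = count_left_alt pointer element array left_result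
instance (pointer : Int) (element : Int) (array : List Int) (left_result : List Int) (out : Int) : Decidable (Spec_count_left pointer element array left_result out) := by unfold Spec_count_left; infer_instance

-- ===== CLAIM (what is proved, stated in full; the proofs are below) =====
def Claim_equal_count_left : Prop := ∀ (pointer : Int) (element : Int) (array : List Int) (left_result : List Int), Dom_count_left pointer element array left_result → Pre_count_left pointer element array left_result → Spec_count_left pointer element array left_result (count_left pointer element array left_result)

-- ===== LEMMAS AND PROOFS =====

-- A's loop computes the first index ≥ element in the reversed prefix (default: its length).
theorem count_left_while_eq (element : Int) (array : List Int) :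
    ∀ (n : Nat), n ≤ array.length → ∀ (count : Int),
      count_left_while element array n count
        = count + ((array.take n).reverse.findIdx (fun x => decide (x ≥ element)) : Int) := by
  intro n
  induction n with
  | zero => intro _ count; simp [count_left_while]
  | succ n ih =>
      intro h count
      have hn : n < array.length := by omega
      have hget : PySem.List.pyGet? array (Int.ofNat n) = some array[n] :=
        PySem.List.pyGet?_ofNat array n hn
      have htake : (array.take (n + 1)).reverse = array[n] :: (array.take n).reverse := by
        rw [List.take_add_one]
        simp [List.getElem?_eq_getElem hn]
      simp only [count_left_while, hget, htake, List.findIdx_cons]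
      by_cases hlt : element > array[n]
      · have hp : decide (array[n] ≥ element) = false := by simp; omega
        rw [if_pos hlt, hp, ih (by omega) (count + 1)]
        simp
        ring
      · have hp : decide (array[n] ≥ element) = true := by simp; omega
        rw [if_neg hlt, hp]
        simp

-- B's forward fold (last blocking index) in terms of the first match in the reversal.
theorem last_blocker_eq (element : Int) :
    ∀ (l : List Int) (s acc : Int),
      (PySem.List.enumerate l s).foldl (fun last ix => if ix.2 ≥ element then ix.1 else last) acc
        = (if (l.reverse.findIdx (fun x => decide (x ≥ element))) < l.length
            then s + (l.length : Int) - 1 - (l.reverse.findIdx (fun x => decide (x ≥ element)) : Int)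
            else acc) := by
  intro l
  induction l using List.reverseRecOn with
  | nil => intro s acc; simp [PySem.List.enumerate]
  | append_singleton l a ih =>
      intro s acc
      rw [PySem.List.enumerate_append]
      simp only [List.foldl_append, ih s acc]
      simp only [PySem.List.enumerate, List.foldl, List.reverse_append, List.reverse_singleton,
        List.singleton_append, List.findIdx_cons, List.length_append, List.length_singleton]
      by_cases hp : a ≥ element
      · simp [hp]
        ring
      · have hpd : decide (a ≥ element) = false := by simp [hp]
        rw [if_neg hp]
        simp only [hpd, cond_false]
        by_cases hk : (l.reverse.findIdx (fun x => decide (x ≥ element))) < l.length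
        · rw [if_pos hk, if_pos (by omega)]
          simp
          ring
        · rw [if_neg hk, if_neg (by omega)]

-- ===== VERDICT (by name: the statement is the Claim_ definition above) =====
theorem count_left_spec : Claim_equal_count_left := by
  intro pointer element array left_result _ hpre
  unfold Spec_count_left count_left count_left_alt Pre_count_left at *
  have hsub : (pointer - 1) + 1 = pointer := by ring
  rw [hsub]
  have hmax : (0:Int) ≤ max pointer 0 := le_max_right _ _
  have hslice : PySem.List.slice array none (some (max pointer 0)) = array.take (max pointer 0).toNat :=
    PySem.List.slice_to array (b := max pointer 0) (hb := hmax)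
  have hnat : (max pointer 0).toNat = pointer.toNat := by omega
  have hle : pointer.toNat ≤ array.length := by omega
  rw [count_left_while_eq element array pointer.toNat hle 0]
  simp only [hslice, hnat, last_blocker_eq element]
  have hlen : (array.take pointer.toNat).length = pointer.toNat := by
    simp [List.length_take]; omega
  have hfle : (array.take pointer.toNat).reverse.findIdx (fun x => decide (x ≥ element))
      ≤ (array.take pointer.toNat).length := by
    simpa using List.findIdx_le_length (p := fun x => decide (x ≥ element))
      (xs := (array.take pointer.toNat).reverse)
  rw [hlen] at hfle ⊢
  by_cases hk : (array.take pointer.toNat).reverse.findIdx (fun x => decide (x ≥ element)) < pointer.toNat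
  · rw [if_pos hk]; omega
  · rw [if_neg hk]
    have : (array.take pointer.toNat).reverse.findIdx (fun x => decide (x ≥ element)) = pointer.toNat := by omega
    rw [this]; omega
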